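-- pv_equiv track=rewrite | github.com/aghamari/ck-pretty-printers | gdbinit_ck_tile/utils/cpp_type_parser.py | extract_tuples
-- ===== SOURCE A (Python) =====
-- def find_matching_bracket(text, start_pos, open_char='<', close_char='>'):
--     """
--     Find the position of the matching closing bracket.
--
--     Args:
--         text: The string to search
--         start_pos: Position of the opening bracket
--         open_char: Opening bracket character
--         close_char: Closing bracket character
--
--     Returns:
--         Position of matching closing bracket, or -1 if not found
--     """
--     bracket_count = 1
--     pos = start_pos + 1
--
--     while pos < len(text) and bracket_count > 0:
--         if text[pos] == open_char:
--             bracket_count += 1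
--         elif text[pos] == close_char:
--             bracket_count -= 1
--         pos += 1
--
--     return pos - 1 if bracket_count == 0 else -1
--
-- def extract_tuples(content):
--     """
--     Extract all ck_tile::tuple<...> from content.
--
--     Args:
--         content: String to search
--
--     Returns:
--         List of tuple contents (without the tuple<> wrapper)
--
--     Example:
--         extract_tuples("tuple<int, float>, other, tuple<double>")
--         -> ["int, float", "double"]
--     """
--     tuples = []
--     pos = 0
--
--     while pos < len(content):
--         # Look for tuple<
--         tuple_patterns = ['ck_tile::tuple<', 'tuple<']
--         found = False
--
--         for pattern in tuple_patterns:
--             if content[pos:].startswith(pattern):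
--                 start = pos + len(pattern) - 1  # Position of '<'
--                 end = find_matching_bracket(content, start, '<', '>')
--
--                 if end != -1:
--                     tuple_content = content[start + 1:end]
--                     tuples.append(tuple_content)
--                     pos = end + 1
--                     found = True
--                     break
--
--         if not found:
--             pos += 1
--
--     return tuples
-- ===== SOURCE B (Python) =====
-- def extract_tuples(content):
--     """Extract all ck_tile::tuple<...> contents from content.
--
--     Single pre-pass builds a bracket-matching table (stack-based), so the
--     per-hit counting rescan of the original disappears; the outer scan then
--     looks the matching '>' up in O(1)."""
--     match = {}
--     stack = []
--     for i, c in enumerate(content):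
--         if c == '<':
--             stack.append(i)
--         elif c == '>':
--             if stack:
--                 match[stack.pop()] = i
--
--     tuples = []
--     pos = 0
--     n = len(content)
--     while pos < n:
--         found = False
--         for pattern in ('ck_tile::tuple<', 'tuple<'):
--             if content.startswith(pattern, pos):
--                 start = pos + len(pattern) - 1  # position of '<'
--                 end = match.get(start, -1)
--                 if end != -1:
--                     tuples.append(content[start + 1:end])
--                     pos = end + 1
--                     found = True
--                     break
--         if not found:
--             pos += 1
--     return tuples
-- ===== Notes on version B (the rewrite author's own statement) =====
-- stated objective: faster
-- what changed: B precomputes a stack-built dict mapping each '<' index to its matching '>' in one pass and starts pattern tests in place, so the per-position slice and the per-hit bracket-counting rescan of A disappear.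
import Mathlib
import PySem

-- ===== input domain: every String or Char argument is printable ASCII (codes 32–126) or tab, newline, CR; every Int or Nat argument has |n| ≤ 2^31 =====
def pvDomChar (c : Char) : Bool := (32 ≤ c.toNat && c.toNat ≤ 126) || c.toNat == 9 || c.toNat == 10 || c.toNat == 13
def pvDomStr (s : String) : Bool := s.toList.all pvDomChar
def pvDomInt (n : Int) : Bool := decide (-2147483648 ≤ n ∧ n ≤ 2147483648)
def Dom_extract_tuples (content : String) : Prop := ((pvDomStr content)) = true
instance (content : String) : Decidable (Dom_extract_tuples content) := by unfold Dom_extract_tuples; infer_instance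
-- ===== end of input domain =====

-- B replaces A's per-hit bracket-counting rescan (and per-position slice) by a single
-- stack-built table mapping each '<' index to its matching '>'; objective: faster.
-- Both while-loops are ported with a structural fuel counter that is provably never
-- exhausted on the positions the loops actually reach (pos strictly increases, fuel
-- starts at length + 1): a plain totality guard, not an algorithm change.

-- ===== PORT A =====
-- while-loop of find_matching_bracket (state: pos, bracket_count); fuel = cs.length - pos,
-- so 'fuel = 0' is exactly 'pos ≥ len(text)', and cs.getD pos is cs[pos] whenever the
-- Python loop reads text[pos] (pos < len there)
def fmbLoop (cs : List Char) : Nat → Nat → Int → Int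
  | 0, pos, cnt => if cnt = 0 then (pos : Int) - 1 else -1
  | fuel + 1, pos, cnt =>
    if cnt > 0 then
      let c := cs.getD pos ' '
      fmbLoop cs fuel (pos + 1) (if c = '<' then cnt + 1 else if c = '>' then cnt - 1 else cnt)
    else
      if cnt = 0 then (pos : Int) - 1 else -1

def find_matching_bracket (cs : List Char) (start : Nat) : Int :=
  fmbLoop cs (cs.length - (start + 1)) (start + 1) 1

def tuplePatterns : List (List Char) := ["ck_tile::tuple<".toList, "tuple<".toList]

-- the inner 'for pattern in tuple_patterns:' with its break
def tryPatterns (cs : List Char) (pos : Nat) : List (List Char) → Option (List Char × Nat)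
  | [] => none
  | p :: rest =>
    if PySem.Chars.startswith (cs.drop pos) p then
      let start := pos + p.length - 1
      let e := find_matching_bracket cs start
      if e ≠ -1 then
        some (PySem.List.slice cs (some ((start : Int) + 1)) (some e), e.toNat + 1)
      else tryPatterns cs pos rest
    else tryPatterns cs pos rest

-- outer while-loop; one fuel unit per iteration (pos strictly increases each iteration,
-- so cs.length + 1 units never run out)
def extractLoop (cs : List Char) : Nat → Nat → List String → List String
  | 0, _, acc => acc
  | fuel + 1, pos, acc =>
    if pos < cs.length then
      match tryPatterns cs pos tuplePatterns with
      | some (tc, np) => extractLoop cs fuel np (acc ++ [String.ofList tc])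
      | none => extractLoop cs fuel (pos + 1) acc
    else acc

def extract_tuples (content : String) : List String :=
  extractLoop content.toList (content.toList.length + 1) 0 []

-- ===== PORT B =====
-- one step of Source B's table-building pass (stack top at the head)
def buildStep (s : List Int × PySem.Dict Int Int) (p : Int × Char) : List Int × PySem.Dict Int Int :=
  if p.2 = '<' then (p.1 :: s.1, s.2)
  else if p.2 = '>' then
    match s.1 with
    | [] => s
    | q :: rest => (rest, s.2.insert q p.1)
  else s

def buildMatch (cs : List Char) : PySem.Dict Int Int :=
  ((PySem.List.enumerate cs 0).foldl buildStep ([], PySem.Dict.empty)).2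

-- the inner 'for pattern in (…):' of Source B; content.startswith(pattern, pos) is exact as
-- a prefix test on cs.drop pos since pos ≥ 0
def tryPatternsB (cs : List Char) (d : PySem.Dict Int Int) (pos : Nat) :
    List (List Char) → Option (List Char × Nat)
  | [] => none
  | p :: rest =>
    if PySem.Chars.startswith (cs.drop pos) p then
      let start := pos + p.length - 1
      let e := d.getD (start : Int) (-1)
      if e ≠ -1 then
        some (PySem.List.slice cs (some ((start : Int) + 1)) (some e), e.toNat + 1)
      else tryPatternsB cs d pos rest
    else tryPatternsB cs d pos rest

-- Source B's while-loop, with the same fuel guard as A's port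
def extractLoopB (cs : List Char) (d : PySem.Dict Int Int) : Nat → Nat → List String → List String
  | 0, _, acc => acc
  | fuel + 1, pos, acc =>
    if pos < cs.length then
      match tryPatternsB cs d pos tuplePatterns with
      | some (tc, np) => extractLoopB cs d fuel np (acc ++ [String.ofList tc])
      | none => extractLoopB cs d fuel (pos + 1) acc
    else acc

def extract_tuples_alt (content : String) : List String :=
  extractLoopB content.toList (buildMatch content.toList) (content.toList.length + 1) 0 []

-- ===== PRECONDITION & SPEC =====
def Spec_extract_tuples (content : String) (out : List String) : Prop := out = extract_tuples_alt content
instance (content : String) (out : List String) : Decidable (Spec_extract_tuples content out) := by unfold Spec_extract_tuples; infer_instance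

-- ===== CLAIM (what is proved, stated in full; the proofs are below) =====
def Claim_equal_extract_tuples : Prop := ∀ (content : String), Dom_extract_tuples content → Spec_extract_tuples content (extract_tuples content)

-- ===== LEMMAS AND PROOFS =====

-- unrolling facts for A's counting loop, read at position k (fuel = cs.length - k)
lemma fmbLoop_step (cs : List Char) (k : Nat) (hk : k < cs.length) (n : Int) (hn : 0 < n) :
    fmbLoop cs (cs.length - k) k n =
      fmbLoop cs (cs.length - (k + 1)) (k + 1)
        (if cs[k] = '<' then n + 1 else if cs[k] = '>' then n - 1 else n) := by
  have hfe : cs.length - k = (cs.length - (k + 1)) + 1 := by omega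
  rw [hfe, fmbLoop, if_pos hn]
  simp [List.getD_eq_getElem?_getD, List.getElem?_eq_getElem hk]

lemma fmbLoop_done (cs : List Char) (k : Nat) (n : Int) (hk : ¬ k < cs.length) (hn : 0 < n) :
    fmbLoop cs (cs.length - k) k n = -1 := by
  have hfe : cs.length - k = 0 := by omega
  rw [hfe, fmbLoop, if_neg (by omega)]

lemma fmbLoop_zero (cs : List Char) (f k : Nat) : fmbLoop cs f k 0 = (k : Int) - 1 := by
  cases f <;> simp [fmbLoop]

-- the invariant of B's table-building pass, stated against A's counting scan
def TblInv (cs : List Char) (k : Nat) (st : List Int) (d : PySem.Dict Int Int) : Prop :=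
  (∀ t (ht : t < st.length), ∃ p : Nat, st[t] = (p : Int) ∧ p < k ∧ cs[p]? = some '<' ∧
      d.get? (p : Int) = none ∧
      find_matching_bracket cs p = fmbLoop cs (cs.length - k) k ((t : Int) + 1)) ∧
  (∀ i : Nat, i < k → cs[i]? = some '<' → (i : Int) ∉ st →
      d.getD (i : Int) (-1) = find_matching_bracket cs i) ∧
  st.Nodup ∧
  (∀ q : Int, (d.get? q).isSome → ∃ i : Nat, q = (i : Int) ∧ i < k)

lemma inv_step (cs : List Char) (k : Nat) (c : Char) (hc : cs[k]? = some c)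
    (st : List Int) (d : PySem.Dict Int Int) (h : TblInv cs k st d) :
    TblInv cs (k + 1) (buildStep (st, d) ((k : Int), c)).1 (buildStep (st, d) ((k : Int), c)).2 := by
  obtain ⟨h1, h2, h3, h4⟩ := h
  have hk : k < cs.length := (List.getElem?_eq_some_iff.1 hc).1
  have hck : cs[k] = c := (List.getElem?_eq_some_iff.1 hc).2
  by_cases hlt : c = '<'
  · -- push k on the stack
    subst hlt
    have hbs : buildStep (st, d) ((k : Int), '<') = ((k : Int) :: st, d) := by
      simp [buildStep]
    rw [hbs]
    refine ⟨?_, ?_, ?_, ?_⟩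
    · intro t ht
      match t, ht with
      | 0, ht =>
        refine ⟨k, rfl, by omega, hc, ?_, ?_⟩
        · cases hq : d.get? ((k : Int)) with
          | none => rfl
          | some v =>
            exfalso
            obtain ⟨i, hi, hik⟩ := h4 (k : Int) (by rw [hq]; rfl)
            have : k = i := by exact_mod_cast hi
            omega
        · show find_matching_bracket cs k = fmbLoop cs (cs.length - (k + 1)) (k + 1) ((0 : Int) + 1)
          rw [find_matching_bracket]; norm_num
      | (t + 1), ht =>
        obtain ⟨p, hp1, hp2, hp3, hp4, hp5⟩ := h1 t (by simpa using ht)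
        refine ⟨p, by simpa using hp1, by omega, hp3, hp4, ?_⟩
        rw [hp5, fmbLoop_step cs k hk _ (by positivity), if_pos hck]
        push_cast; ring_nf
    · intro i hik hci hmem
      have hik' : i < k := by
        rcases Nat.lt_succ_iff_lt_or_eq.1 hik with h | rfl
        · exact h
        · exfalso; apply hmem; simp
      exact h2 i hik' hci (fun hmm => hmem (List.mem_cons_of_mem _ hmm))
    · refine List.nodup_cons.2 ⟨?_, h3⟩
      intro hmem
      obtain ⟨t, ht, heq⟩ := List.mem_iff_getElem.1 hmem
      obtain ⟨p, hp1, hp2, -, -, -⟩ := h1 t ht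
      rw [hp1] at heq
      have : p = k := by exact_mod_cast heq
      omega
    · intro q hq
      obtain ⟨i, hi, hik⟩ := h4 q hq
      exact ⟨i, hi, by omega⟩
  · by_cases hgt : c = '>'
    · subst hgt
      match hst : st with
      | [] =>
        have hbs : buildStep (([] : List Int), d) ((k : Int), '>') = ([], d) := by
          simp [buildStep]
        rw [hbs]
        refine ⟨by intro t ht; simp at ht, ?_, List.nodup_nil, ?_⟩
        · intro i hik hci hmem
          have hik' : i < k := by
            rcases Nat.lt_succ_iff_lt_or_eq.1 hik with h | rfl
            · exact h
            · rw [hci] at hc; simp at hc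
          exact h2 i hik' hci (by simp)
        · intro q hq
          obtain ⟨i, hi, hik⟩ := h4 q hq
          exact ⟨i, hi, by omega⟩
      | q :: rest =>
        obtain ⟨p0, hq0, hp0k, hp0c, hp0n, hp0f⟩ := h1 0 (by simp)
        simp only [List.getElem_cons_zero] at hq0
        subst hq0
        have hbs : buildStep (((p0 : Int) :: rest), d) ((k : Int), '>') =
            (rest, d.insert (p0 : Int) (k : Int)) := by
          simp [buildStep]
        rw [hbs]
        have hqrest : ((p0 : Int)) ∉ rest := (List.nodup_cons.1 h3).1
        have hfmb0 : find_matching_bracket cs p0 = (k : Int) := by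
          rw [hp0f]
          norm_num
          rw [fmbLoop_step cs k hk 1 one_pos, if_neg (by simp [hck]), if_pos hck]
          norm_num [fmbLoop_zero]
        refine ⟨?_, ?_, (List.nodup_cons.1 h3).2, ?_⟩
        · intro t ht
          obtain ⟨p, hp1, hp2, hp3, hp4, hp5⟩ := h1 (t + 1) (by simpa using ht)
          simp only [List.getElem_cons_succ] at hp1
          have hne : (p : Int) ≠ (p0 : Int) := by
            intro hpe
            rw [← hp1] at hpe
            exact hqrest (hpe ▸ List.getElem_mem ht)
          refine ⟨p, hp1, by omega, hp3, ?_, ?_⟩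
          · rw [PySem.Dict.get?_insert_of_ne _ _ hne]
            exact hp4
          · rw [hp5, fmbLoop_step cs k hk _ (by positivity), if_neg (by simp [hck]),
              if_pos hck]
            push_cast; ring_nf
        · intro i hik hci hmem
          by_cases hip : (i : Int) = (p0 : Int)
          · have : i = p0 := by exact_mod_cast hip
            subst this
            rw [hip, PySem.Dict.getD_insert_self, hfmb0]
          · rw [PySem.Dict.getD_insert_of_ne _ _ _ hip]
            have hik' : i < k := by
              rcases Nat.lt_succ_iff_lt_or_eq.1 hik with h | rfl
              · exact h
              · rw [hci] at hc; simp at hc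
            refine h2 i hik' hci ?_
            intro hmm
            rcases List.mem_cons.1 hmm with he | hmm
            · exact hip he
            · exact hmem hmm
        · intro q hq
          rw [PySem.Dict.get?_insert] at hq
          split_ifs at hq with hqe
          · exact ⟨p0, hqe, by omega⟩
          · obtain ⟨i, hi, hik⟩ := h4 q hq
            exact ⟨i, hi, by omega⟩
    · -- any other character: state unchanged
      have hbs : buildStep (st, d) ((k : Int), c) = (st, d) := by
        simp [buildStep, hlt, hgt]
      rw [hbs]
      refine ⟨?_, ?_, h3, ?_⟩
      · intro t ht
        obtain ⟨p, hp1, hp2, hp3, hp4, hp5⟩ := h1 t ht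
        refine ⟨p, hp1, by omega, hp3, hp4, ?_⟩
        rw [hp5, fmbLoop_step cs k hk _ (by positivity), if_neg (by simp [hck, hlt]),
          if_neg (by simp [hck, hgt])]
      · intro i hik hci hmem
        have hik' : i < k := by
          rcases Nat.lt_succ_iff_lt_or_eq.1 hik with h | rfl
          · exact h
          · rw [hci] at hc
            simp only [Option.some.injEq] at hc
            exact absurd hc.symm hlt
        exact h2 i hik' hci hmem
      · intro q hq
        obtain ⟨i, hi, hik⟩ := h4 q hq
        exact ⟨i, hi, by omega⟩

lemma inv_fold (cs : List Char) :
    ∀ (l : List Char) (k : Nat) (st : List Int) (d : PySem.Dict Int Int),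
    cs.drop k = l → k ≤ cs.length → TblInv cs k st d →
    TblInv cs cs.length ((PySem.List.enumerate l (k : Int)).foldl buildStep (st, d)).1
      ((PySem.List.enumerate l (k : Int)).foldl buildStep (st, d)).2 := by
  intro l
  induction l with
  | nil =>
    intro k st d hdrop hk h
    have : cs.length = k := by
      have := congrArg List.length hdrop
      simp at this
      omega
    rw [this]
    simpa [PySem.List.enumerate_nil] using h
  | cons c l ih =>
    intro k st d hdrop hk h
    have hck : cs[k]? = some c := by
      have : (cs.drop k)[0]? = some c := by rw [hdrop]; rfl
      rwa [List.getElem?_drop] at this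
    have hkl : k < cs.length := (List.getElem?_eq_some_iff.1 hck).1
    have hdrop' : cs.drop (k + 1) = l := by
      have := congrArg List.tail hdrop
      simpa [List.tail_drop] using this
    rw [PySem.List.enumerate_cons, List.foldl_cons]
    have hstep := inv_step cs k c hck st d h
    have hcast : ((k : Int) + 1) = ((k + 1 : Nat) : Int) := by push_cast; ring
    rw [hcast]
    have := ih (k + 1) (buildStep (st, d) ((k : Int), c)).1 (buildStep (st, d) ((k : Int), c)).2
      hdrop' (by omega) hstep
    simpa using this

lemma table_fmb (cs : List Char) (i : Nat) (hi : cs[i]? = some '<') :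
    (buildMatch cs).getD (i : Int) (-1) = find_matching_bracket cs i := by
  have hinit : TblInv cs 0 [] PySem.Dict.empty := by
    refine ⟨by intro t ht; simp at ht, by intro i hi; omega, List.nodup_nil, ?_⟩
    intro q hq
    rw [PySem.Dict.get?_empty] at hq
    simp at hq
  have hinv := inv_fold cs cs 0 [] PySem.Dict.empty (by simp) (by omega) hinit
  obtain ⟨h1, h2, -, -⟩ := hinv
  have hil : i < cs.length := (List.getElem?_eq_some_iff.1 hi).1
  set r := (PySem.List.enumerate cs ((0 : Nat) : Int)).foldl buildStep ([], PySem.Dict.empty) with hr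
  have hbm : buildMatch cs = r.2 := by
    rw [buildMatch, hr]; norm_num
  rw [hbm]
  by_cases hmem : (i : Int) ∈ r.1
  · obtain ⟨t, ht, hteq⟩ := List.mem_iff_getElem.1 hmem
    obtain ⟨p, hp1, -, -, hp4, hp5⟩ := h1 t ht
    have hpi : p = i := by rw [hp1] at hteq; exact_mod_cast hteq
    subst hpi
    rw [PySem.Dict.getD_eq_get?_getD, hp4, hp5,
      fmbLoop_done cs cs.length _ (by omega) (by positivity)]
    rfl
  · exact h2 i hil hi hmem

lemma tryPatterns_eq (cs : List Char) (pos : Nat) :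
    ∀ ps : List (List Char), (∀ p ∈ ps, p ≠ [] ∧ p.getLast? = some '<') →
    tryPatternsB cs (buildMatch cs) pos ps = tryPatterns cs pos ps := by
  intro ps
  induction ps with
  | nil => intro _; rfl
  | cons p rest ih =>
    intro hps
    obtain ⟨hne, hlast⟩ := hps p (List.mem_cons_self ..)
    rw [tryPatterns, tryPatternsB]
    by_cases hsw : PySem.Chars.startswith (cs.drop pos) p = true
    · rw [if_pos hsw, if_pos hsw]
      have hch : cs[pos + p.length - 1]? = some '<' := by
        obtain ⟨t, ht⟩ := (PySem.Chars.startswith_iff _ _).1 hsw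
        have hj : p.length - 1 < p.length := by
          cases p
          · simp at hne
          · simp
        have h1 : (cs.drop pos)[p.length - 1]? = some '<' := by
          rw [← ht, List.getElem?_append_left hj, ← List.getLast?_eq_getElem?, hlast]
        rw [List.getElem?_drop] at h1
        have hre : pos + p.length - 1 = pos + (p.length - 1) := by omega
        rw [hre]
        exact h1
      have htab := table_fmb cs (pos + p.length - 1) hch
      simp only [ne_eq]
      rw [htab]
      split_ifs with hone
      · exact ih fun q hq => hps q (List.mem_cons_of_mem _ hq)
      · rfl
    · rw [if_neg hsw, if_neg hsw]
      exact ih fun q hq => hps q (List.mem_cons_of_mem _ hq)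

lemma loop_eq (cs : List Char) :
    ∀ (fuel pos : Nat) (acc : List String),
    extractLoopB cs (buildMatch cs) fuel pos acc = extractLoop cs fuel pos acc := by
  intro fuel
  induction fuel with
  | zero => intro pos acc; rfl
  | succ fuel ih =>
    intro pos acc
    rw [extractLoopB, extractLoop]
    by_cases hp : pos < cs.length
    · rw [if_pos hp, if_pos hp]
      have hpat : ∀ p ∈ tuplePatterns, p ≠ [] ∧ p.getLast? = some '<' := by decide
      rw [tryPatterns_eq cs pos tuplePatterns hpat]
      cases htp : tryPatterns cs pos tuplePatterns with
      | none => exact ih (pos + 1) acc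
      | some v =>
        obtain ⟨tc, np⟩ := v
        exact ih np _
    · rw [if_neg hp, if_neg hp]

-- ===== VERDICT (by name: the statement is the Claim_ definition above) =====
theorem extract_tuples_spec : Claim_equal_extract_tuples := by
  intro content _
  unfold Spec_extract_tuples extract_tuples extract_tuples_alt
  exact (loop_eq content.toList (content.toList.length + 1) 0 []).symm
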